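-- pv_equiv track=rewrite | github.com/MrStrelow/BBRZ | Python/FuerErfahrene/L04Funktionen/live/L4.1_muster.py | draw_diamant
-- ===== SOURCE A (Python) =====
-- dimension = 10
--
-- class Position:
--     TOP_RIGHT = 1
--     TOP_LEFT = 2
--     BOT_RIGHT = 3
--     BOT_LEFT = 4
--
-- def mirror_x(field):
--     copy_of_field = copy(field)
--
--     for y in range(len(field)):
--         for x in range(len(field)):
--             copy_of_field[y][x] = field[len(field) - 1 - y][x]
--
--     return copy_of_field
--
-- def mirror_y(field):
--     copy_of_field = copy(field)
--
--     for y in range(len(field)):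
--         for x in range(len(field)):
--             copy_of_field[y][x] = field[y][len(field) - 1 - x]
--
--     return copy_of_field
--
-- def copy(field):
--     # copy_of_field = []
--     # for y in range(dimension):
--     #     row = []
--     #     for x in range(dimension):
--     #         row.append(field[y][x])
--
--     #     copy_of_field.append(row)
--
--     return [[elem for elem in row] for row in field]
--
-- def zammstoepsln(container, triangle, position): #combine_form()
--     offset = len(triangle)
--
--     for y in range(len(triangle)):
--         for x in range(len(triangle)):
--             if position == Position.TOP_LEFT:
--                 container[y][x] = triangle[y][x]
--
--             elif position == Position.TOP_RIGHT:
--                 container[y][x + offset] = triangle[y][x]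
--
--             elif position == Position.BOT_LEFT:
--                 container[y + offset][x] = triangle[y][x]
--
--             elif position == Position.BOT_RIGHT:
--                 container[y + offset][x + offset] = triangle[y][x]
--
--     return container
--
-- def draw_diamant(triangle_top_right):
--     triangle_top_left  = mirror_y(triangle_top_right)
--     triangle_bot_right = mirror_x(triangle_top_right)
--     triangle_bot_left  = mirror_x(triangle_top_left)
--
--     container = [["" for _ in range(dimension * 2)] for _ in range(dimension * 2)]
--     diamant = zammstoepsln(container, triangle_top_right, Position.TOP_RIGHT)
--     diamant = zammstoepsln(container, triangle_top_left, Position.TOP_LEFT)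
--     diamant = zammstoepsln(container, triangle_bot_right, Position.BOT_RIGHT)
--     diamant = zammstoepsln(container, triangle_bot_left, Position.BOT_LEFT)
--
--     return diamant
-- ===== SOURCE B (Python) =====
-- dimension = 10
--
-- def draw_diamant(triangle_top_right):
--     n = len(triangle_top_right)
--     container = [["" for _ in range(dimension * 2)] for _ in range(dimension * 2)]
--     for y in range(n):
--         for x in range(n):
--             container[y][x] = triangle_top_right[y][n - 1 - x]
--             container[y][x + n] = triangle_top_right[y][x]
--             container[y + n][x] = triangle_top_right[n - 1 - y][n - 1 - x]
--             container[y + n][x + n] = triangle_top_right[n - 1 - y][x]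
--     return container
-- ===== Notes on version B (the rewrite author's own statement) =====
-- stated objective: simpler
-- what changed: Replaced the three full-grid mirror passes (mirror_y/mirror_x via a copy helper) plus four separate placement passes with a single double loop that writes all four quadrant cells directly from the source triangle via index formulas.
import Mathlib
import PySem

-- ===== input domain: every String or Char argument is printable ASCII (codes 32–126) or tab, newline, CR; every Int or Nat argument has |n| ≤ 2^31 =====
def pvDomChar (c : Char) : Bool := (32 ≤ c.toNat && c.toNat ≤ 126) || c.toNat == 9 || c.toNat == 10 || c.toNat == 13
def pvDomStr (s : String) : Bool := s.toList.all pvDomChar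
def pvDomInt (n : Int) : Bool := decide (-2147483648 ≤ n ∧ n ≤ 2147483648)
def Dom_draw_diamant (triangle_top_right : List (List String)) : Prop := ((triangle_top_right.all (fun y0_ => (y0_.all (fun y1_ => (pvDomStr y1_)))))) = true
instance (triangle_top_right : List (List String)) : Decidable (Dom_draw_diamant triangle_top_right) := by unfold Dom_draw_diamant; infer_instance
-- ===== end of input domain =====

-- B replaces A's three mirror passes and four placement passes with one double loop that writes
-- all four quadrant cells directly via index formulas (objective: simpler; A does not mutate its argument).

-- `container[y][x] = v` (in-place assignment on a list of lists), as a functional update.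
-- Inside Pre_ every such write is in range, so this matches Python exactly (out of range Python raises).
def setCell (g : List (List String)) (y x : Nat) (v : String) : List (List String) :=
  g.set y ((g.getD y []).set x v)

-- ===== PORT A =====
-- dimension = 10
def pvDimension : Nat := 10

-- Position.TOP_RIGHT = 1, TOP_LEFT = 2, BOT_RIGHT = 3, BOT_LEFT = 4 (used as plain numbers below)
def pyCopy (field : List (List String)) : List (List String) :=
  field.map (fun row => row.map (fun elem => elem))

def mirror_x (field : List (List String)) : List (List String) :=
  (List.range field.length).foldl (fun acc y =>
    (List.range field.length).foldl (fun acc2 x =>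
      setCell acc2 y x ((field.getD (field.length - 1 - y) []).getD x "")) acc) (pyCopy field)

def mirror_y (field : List (List String)) : List (List String) :=
  (List.range field.length).foldl (fun acc y =>
    (List.range field.length).foldl (fun acc2 x =>
      setCell acc2 y x ((field.getD y []).getD (field.length - 1 - x) "")) acc) (pyCopy field)

def zammstoepsln (container : List (List String)) (triangle : List (List String)) (position : Nat) :
    List (List String) :=
  let offset := triangle.length
  (List.range triangle.length).foldl (fun acc y =>
    (List.range triangle.length).foldl (fun acc2 x =>
      if position = 2 then setCell acc2 y x ((triangle.getD y []).getD x "")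
      else if position = 1 then setCell acc2 y (x + offset) ((triangle.getD y []).getD x "")
      else if position = 4 then setCell acc2 (y + offset) x ((triangle.getD y []).getD x "")
      else if position = 3 then setCell acc2 (y + offset) (x + offset) ((triangle.getD y []).getD x "")
      else acc2) acc) container

def draw_diamant (triangle_top_right : List (List String)) : List (List String) :=
  let triangle_top_left := mirror_y triangle_top_right
  let triangle_bot_right := mirror_x triangle_top_right
  let triangle_bot_left := mirror_x triangle_top_left
  let container := List.replicate (pvDimension * 2) (List.replicate (pvDimension * 2) "")
  let d1 := zammstoepsln container triangle_top_right 1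
  let d2 := zammstoepsln d1 triangle_top_left 2
  let d3 := zammstoepsln d2 triangle_bot_right 3
  zammstoepsln d3 triangle_bot_left 4

-- ===== PORT B =====
def draw_diamant_alt (triangle_top_right : List (List String)) : List (List String) :=
  let n := triangle_top_right.length
  let container := List.replicate (pvDimension * 2) (List.replicate (pvDimension * 2) "")
  (List.range n).foldl (fun c y =>
    (List.range n).foldl (fun c x =>
      setCell
        (setCell
          (setCell
            (setCell c y x ((triangle_top_right.getD y []).getD (n - 1 - x) ""))
            y (x + n) ((triangle_top_right.getD y []).getD x ""))
          (y + n) x ((triangle_top_right.getD (n - 1 - y) []).getD (n - 1 - x) ""))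
        (y + n) (x + n) ((triangle_top_right.getD (n - 1 - y) []).getD x "")) c) container

-- ===== PRECONDITION & SPEC =====
-- Pre_ is exactly where Python A returns normally: with more than 10 rows the placement writes
-- overflow the fixed 20x20 container (IndexError), and a row shorter than the number of rows makes
-- the mirror helpers read past its end (IndexError).
def Pre_draw_diamant (triangle_top_right : List (List String)) : Prop :=
  triangle_top_right.length ≤ 10 ∧
    ∀ row ∈ triangle_top_right, triangle_top_right.length ≤ row.length

instance (triangle_top_right : List (List String)) : Decidable (Pre_draw_diamant triangle_top_right) := by
  unfold Pre_draw_diamant; infer_instance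

def pvWitness_draw_diamant : List (List String) := [["a", "b"], ["c", "d"]]

def Spec_draw_diamant (triangle_top_right : List (List String)) (out : List (List String)) : Prop :=
  out = draw_diamant_alt triangle_top_right
instance (triangle_top_right : List (List String)) (out : List (List String)) : Decidable (Spec_draw_diamant triangle_top_right out) := by unfold Spec_draw_diamant; infer_instance

-- ===== CLAIM (what is proved, stated in full; the proofs are below) =====
def Claim_equal_draw_diamant : Prop := ∀ (triangle_top_right : List (List String)), Dom_draw_diamant triangle_top_right → Pre_draw_diamant triangle_top_right → Spec_draw_diamant triangle_top_right (draw_diamant triangle_top_right)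

-- ===== LEMMAS AND PROOFS =====

-- the value of cell (i, j) of a grid (out-of-range reads give "", only used in range)
def cellVal (g : List (List String)) (i j : Nat) : String := (g.getD i []).getD j ""

theorem length_setCell (g : List (List String)) (y x : Nat) (v : String) :
    (setCell g y x v).length = g.length := by
  simp [setCell]

theorem rowlen_setCell (g : List (List String)) (y x : Nat) (v : String) (i : Nat) :
    ((setCell g y x v).getD i []).length = ((g.getD i []).length) := by
  simp only [setCell, List.getD_eq_getElem?_getD, List.getElem?_set]
  split_ifs <;> simp_all

theorem cellVal_setCell (g : List (List String)) (y x : Nat) (v : String) (i j : Nat) :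
    cellVal (setCell g y x v) i j =
      if i = y ∧ j = x ∧ y < g.length ∧ x < ((g.getD y []).length) then v else cellVal g i j := by
  simp only [cellVal, setCell, List.getD_eq_getElem?_getD, List.getElem?_set]
  by_cases hiy : y = i
  · subst hiy
    by_cases hy : y < g.length
    · simp only [if_true, hy, true_and, Option.getD_some]
      rw [List.getElem?_set]
      by_cases hjx : x = j
      · subst hjx
        by_cases hx : x < (g[y]?.getD []).length
        · simp [hx]
        · simp [hx]
      · rw [if_neg hjx, if_neg (fun hc => hjx hc.1.symm)]
    · simp [hy]
  · rw [if_neg hiy, if_neg (fun hc => hiy hc.1.symm)]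

-- a fold whose every step preserves the grid shape preserves the grid shape
theorem shape_foldl {α : Type} (F : List (List String) → α → List (List String))
    (hF : ∀ g a, (F g a).length = g.length ∧ ∀ i, ((F g a).getD i []).length = ((g.getD i []).length)) :
    ∀ (L : List α) (g : List (List String)),
      (L.foldl F g).length = g.length ∧ ∀ i, ((L.foldl F g).getD i []).length = ((g.getD i []).length) := by
  intro L
  induction L with
  | nil => intro g; exact ⟨rfl, fun _ => rfl⟩
  | cons a L ih =>
    intro g
    exact ⟨by simp only [List.foldl_cons, (ih (F g a)).1, (hF g a).1],
           fun i => by simp only [List.foldl_cons, (ih (F g a)).2 i, (hF g a).2 i]⟩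

-- inner loop of a single-write pass: writes row yt at columns dx, …, dx+k-1
theorem winner (dx : Nat) (f : Nat → String) (yt : Nat) (h : List (List String))
    (hy : yt < h.length) (k : Nat) (hx : ∀ x, x < k → x + dx < ((h.getD yt []).length)) (i j : Nat) :
    cellVal ((List.range k).foldl (fun b x => setCell b yt (x + dx) (f x)) h) i j =
      if i = yt ∧ dx ≤ j ∧ j < dx + k then f (j - dx) else cellVal h i j := by
  induction k with
  | zero => simp only [List.range_zero, List.foldl_nil]; rw [if_neg (by omega)]
  | succ k ih =>
    simp only [List.range_succ, List.foldl_append, List.foldl_cons, List.foldl_nil]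
    have hsh := shape_foldl (fun b x => setCell b yt (x + dx) (f x))
      (fun g a => ⟨length_setCell g yt (a + dx) (f a), fun i => rowlen_setCell g yt (a + dx) (f a) i⟩)
      (List.range k) h
    rw [cellVal_setCell]
    rw [ih (fun x hxk => hx x (by omega))]
    have c1 : yt < ((List.range k).foldl (fun b x => setCell b yt (x + dx) (f x)) h).length := by
      rw [hsh.1]; exact hy
    have c2 : k + dx < (((List.range k).foldl (fun b x => setCell b yt (x + dx) (f x)) h).getD yt []).length := by
      rw [hsh.2 yt]; exact hx k (by omega)
    by_cases hm : i = yt ∧ j = k + dx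
    · rw [if_pos ⟨hm.1, hm.2, c1, c2⟩, if_pos (by omega)]
      exact congrArg f (by omega)
    · rw [if_neg (by tauto)]
      by_cases hin : i = yt ∧ dx ≤ j ∧ j < dx + k
      · rw [if_pos hin, if_pos (by omega)]
      · rw [if_neg hin, if_neg (by omega)]

-- outer loop of a single-write pass: m rows done, each writing columns dx, …, dx+n-1 of row y+dy
theorem wouter (n dy dx : Nat) (v : Nat → Nat → String) (g : List (List String))
    (hr : ∀ y, y < n → y + dy < g.length)
    (hc : ∀ y x, y < n → x < n → x + dx < ((g.getD (y + dy) []).length)) :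
    ∀ (m : Nat), m ≤ n → ∀ (i j : Nat),
      cellVal ((List.range m).foldl (fun a y =>
          (List.range n).foldl (fun b x => setCell b (y + dy) (x + dx) (v y x)) a) g) i j =
        if dy ≤ i ∧ i < dy + m ∧ dx ≤ j ∧ j < dx + n then v (i - dy) (j - dx) else cellVal g i j := by
  intro m
  induction m with
  | zero => intro _ i j; simp only [List.range_zero, List.foldl_nil]; rw [if_neg (by omega)]
  | succ m ih =>
    intro hm i j
    simp only [List.range_succ, List.foldl_append, List.foldl_cons, List.foldl_nil]
    have hFin : ∀ (g' : List (List String)) (y : Nat),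
        ((List.range n).foldl (fun b x => setCell b (y + dy) (x + dx) (v y x)) g').length = g'.length ∧
        ∀ i, (((List.range n).foldl (fun b x => setCell b (y + dy) (x + dx) (v y x)) g').getD i []).length = ((g'.getD i []).length) :=
      fun g' y => shape_foldl _ (fun g2 a => ⟨length_setCell g2 (y + dy) (a + dx) (v y a),
        fun i => rowlen_setCell g2 (y + dy) (a + dx) (v y a) i⟩) (List.range n) g'
    have hG := shape_foldl _ hFin (List.range m) g
    rw [winner dx (v m) (m + dy) _ (by rw [hG.1]; exact hr m (by omega)) n
        (fun x hx => by rw [hG.2 (m + dy)]; exact hc m x (by omega) hx) i j]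
    rw [ih (by omega) i j]
    by_cases h1 : i = m + dy ∧ dx ≤ j ∧ j < dx + n
    · rw [if_pos h1, if_pos (by omega)]
      rw [show i - dy = m by omega]
    · rw [if_neg h1]
      by_cases h2 : dy ≤ i ∧ i < dy + m ∧ dx ≤ j ∧ j < dx + n
      · rw [if_pos h2, if_pos (by omega)]
      · rw [if_neg h2, if_neg (by omega)]

-- inner loop of B: row m writes its four quadrant cells for columns 0, …, k-1
theorem binner (n : Nat) (t1 t2 t3 t4 : Nat → String) (m : Nat)
    (h : List (List String)) (hr1 : m < h.length) (hr2 : m + n < h.length)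
    (hcm : ∀ x, x < n → x + n < ((h.getD m []).length))
    (hcmn : ∀ x, x < n → x + n < ((h.getD (m + n) []).length)) (hn : 0 < n) :
    ∀ (k : Nat), k ≤ n → ∀ (i j : Nat),
      cellVal ((List.range k).foldl (fun b x =>
          setCell (setCell (setCell (setCell b m x (t1 x)) m (x + n) (t2 x)) (m + n) x (t3 x)) (m + n) (x + n) (t4 x)) h) i j =
        if i = m ∧ j < k then t1 j
        else if i = m ∧ n ≤ j ∧ j < n + k then t2 (j - n)
        else if i = m + n ∧ j < k then t3 j
        else if i = m + n ∧ n ≤ j ∧ j < n + k then t4 (j - n)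
        else cellVal h i j := by
  intro k
  induction k with
  | zero =>
    intro _ i j
    simp only [List.range_zero, List.foldl_nil]
    rw [if_neg (by omega), if_neg (by omega), if_neg (by omega), if_neg (by omega)]
  | succ k ih =>
    intro hk i j
    simp only [List.range_succ, List.foldl_append, List.foldl_cons, List.foldl_nil]
    have hG := shape_foldl (fun b x =>
        setCell (setCell (setCell (setCell b m x (t1 x)) m (x + n) (t2 x)) (m + n) x (t3 x)) (m + n) (x + n) (t4 x))
      (fun g a => ⟨by simp only [length_setCell], fun i => by simp only [rowlen_setCell]⟩)
      (List.range k) h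
    simp only [cellVal_setCell, length_setCell, rowlen_setCell, hG.1, hG.2]
    rw [ih (by omega) i j]
    have hb1 : k + n < ((h.getD (m + n) []).length) := hcmn k (by omega)
    have hb2 : k < ((h.getD (m + n) []).length) := by omega
    have hb3 : k + n < ((h.getD m []).length) := hcm k (by omega)
    have hb4 : k < ((h.getD m []).length) := by omega
    split_ifs <;> first
      | rfl
      | omega
      | exact congrArg t1 (by omega)
      | exact congrArg t2 (by omega)
      | exact congrArg t3 (by omega)
      | exact congrArg t4 (by omega)

-- outer loop of B on the 20x20 container
theorem bouter (n : Nat) (V1 V2 V3 V4 : Nat → Nat → String) (g : List (List String))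
    (hgl : g.length = 20) (hgr : ∀ i, i < 20 → ((g.getD i []).length) = 20) (hn : n ≤ 10) :
    ∀ (m : Nat), m ≤ n → ∀ (i j : Nat),
      cellVal ((List.range m).foldl (fun c y => (List.range n).foldl (fun c x =>
          setCell (setCell (setCell (setCell c y x (V1 y x)) y (x + n) (V2 y x)) (y + n) x (V3 y x)) (y + n) (x + n) (V4 y x)) c) g) i j =
        if i < m ∧ j < n then V1 i j
        else if i < m ∧ n ≤ j ∧ j < n + n then V2 i (j - n)
        else if n ≤ i ∧ i < n + m ∧ j < n then V3 (i - n) j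
        else if n ≤ i ∧ i < n + m ∧ n ≤ j ∧ j < n + n then V4 (i - n) (j - n)
        else cellVal g i j := by
  intro m
  induction m with
  | zero =>
    intro _ i j
    simp only [List.range_zero, List.foldl_nil]
    rw [if_neg (by omega), if_neg (by omega), if_neg (by omega), if_neg (by omega)]
  | succ m ih =>
    intro hm i j
    simp only [List.range_succ, List.foldl_append, List.foldl_cons, List.foldl_nil]
    have hFin : ∀ (g' : List (List String)) (y : Nat),
        ((List.range n).foldl (fun c x =>
          setCell (setCell (setCell (setCell c y x (V1 y x)) y (x + n) (V2 y x)) (y + n) x (V3 y x)) (y + n) (x + n) (V4 y x)) g').length = g'.length ∧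
        ∀ i, (((List.range n).foldl (fun c x =>
          setCell (setCell (setCell (setCell c y x (V1 y x)) y (x + n) (V2 y x)) (y + n) x (V3 y x)) (y + n) (x + n) (V4 y x)) g').getD i []).length = ((g'.getD i []).length) :=
      fun g' y => shape_foldl _ (fun g2 a => ⟨by simp only [length_setCell], fun i => by simp only [rowlen_setCell]⟩) (List.range n) g'
    have hG := shape_foldl _ hFin (List.range m) g
    rw [binner n (V1 m) (V2 m) (V3 m) (V4 m) m _ (by rw [hG.1, hgl]; omega) (by rw [hG.1, hgl]; omega)
        (fun x hx => by rw [hG.2 m, hgr m (by omega)]; omega)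
        (fun x hx => by rw [hG.2 (m + n), hgr (m + n) (by omega)]; omega)
        (by omega) n le_rfl i j]
    rw [ih (by omega) i j]
    split_ifs <;> first
      | rfl
      | omega
      | (congr 1 <;> first | rfl | omega)

theorem pyCopy_id (f : List (List String)) : pyCopy f = f := by
  simp [pyCopy]

theorem mirror_y_shape (f : List (List String)) :
    (mirror_y f).length = f.length ∧ ∀ i, ((mirror_y f).getD i []).length = ((f.getD i []).length) := by
  simp only [mirror_y, pyCopy_id]
  exact shape_foldl _ (fun g y => shape_foldl _
    (fun g' x => ⟨length_setCell g' y x _, fun i => rowlen_setCell g' y x _ i⟩) _ g) _ f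

theorem mirror_x_shape (f : List (List String)) :
    (mirror_x f).length = f.length ∧ ∀ i, ((mirror_x f).getD i []).length = ((f.getD i []).length) := by
  simp only [mirror_x, pyCopy_id]
  exact shape_foldl _ (fun g y => shape_foldl _
    (fun g' x => ⟨length_setCell g' y x _, fun i => rowlen_setCell g' y x _ i⟩) _ g) _ f

theorem mirror_y_cell (f : List (List String))
    (hrow : ∀ y, y < f.length → f.length ≤ ((f.getD y []).length)) (i j : Nat) :
    cellVal (mirror_y f) i j =
      if i < f.length ∧ j < f.length then cellVal f i (f.length - 1 - j) else cellVal f i j := by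
  have h := wouter f.length 0 0 (fun y x => (f.getD y []).getD (f.length - 1 - x) "") f
    (fun y hy => by simpa using hy) (fun y x hy hx => by simpa using lt_of_lt_of_le hx (hrow y hy))
    f.length le_rfl i j
  simp only [mirror_y, pyCopy_id]
  simpa [cellVal] using h

theorem mirror_x_cell (f : List (List String))
    (hrow : ∀ y, y < f.length → f.length ≤ ((f.getD y []).length)) (i j : Nat) :
    cellVal (mirror_x f) i j =
      if i < f.length ∧ j < f.length then cellVal f (f.length - 1 - i) j else cellVal f i j := by
  have h := wouter f.length 0 0 (fun y x => (f.getD (f.length - 1 - y) []).getD x "") f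
    (fun y hy => by simpa using hy) (fun y x hy hx => by simpa using lt_of_lt_of_le hx (hrow y hy))
    f.length le_rfl i j
  simp only [mirror_x, pyCopy_id]
  simpa [cellVal] using h

theorem zamm1_cell (c tri : List (List String))
    (hr : ∀ y, y < tri.length → y < c.length)
    (hc : ∀ y x, y < tri.length → x < tri.length → x + tri.length < ((c.getD y []).length)) (i j : Nat) :
    cellVal (zammstoepsln c tri 1) i j =
      if i < tri.length ∧ tri.length ≤ j ∧ j < tri.length + tri.length then cellVal tri i (j - tri.length)
      else cellVal c i j := by
  have h := wouter tri.length 0 tri.length (fun y x => (tri.getD y []).getD x "") c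
    (fun y hy => by simpa using hr y hy) (fun y x hy hx => by simpa using hc y x hy hx)
    tri.length le_rfl i j
  simp only [zammstoepsln]
  simpa [cellVal] using h

theorem zamm2_cell (c tri : List (List String))
    (hr : ∀ y, y < tri.length → y < c.length)
    (hc : ∀ y x, y < tri.length → x < tri.length → x < ((c.getD y []).length)) (i j : Nat) :
    cellVal (zammstoepsln c tri 2) i j =
      if i < tri.length ∧ j < tri.length then cellVal tri i j
      else cellVal c i j := by
  have h := wouter tri.length 0 0 (fun y x => (tri.getD y []).getD x "") c
    (fun y hy => by simpa using hr y hy) (fun y x hy hx => by simpa using hc y x hy hx)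
    tri.length le_rfl i j
  simp only [zammstoepsln]
  simpa [cellVal] using h

theorem zamm3_cell (c tri : List (List String))
    (hr : ∀ y, y < tri.length → y + tri.length < c.length)
    (hc : ∀ y x, y < tri.length → x < tri.length → x + tri.length < ((c.getD (y + tri.length) []).length)) (i j : Nat) :
    cellVal (zammstoepsln c tri 3) i j =
      if tri.length ≤ i ∧ i < tri.length + tri.length ∧ tri.length ≤ j ∧ j < tri.length + tri.length then
        cellVal tri (i - tri.length) (j - tri.length)
      else cellVal c i j := by
  have h := wouter tri.length tri.length tri.length (fun y x => (tri.getD y []).getD x "") c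
    (fun y hy => hr y hy) (fun y x hy hx => hc y x hy hx)
    tri.length le_rfl i j
  simp only [zammstoepsln]
  simpa [cellVal] using h

theorem zamm4_cell (c tri : List (List String))
    (hr : ∀ y, y < tri.length → y + tri.length < c.length)
    (hc : ∀ y x, y < tri.length → x < tri.length → x < ((c.getD (y + tri.length) []).length)) (i j : Nat) :
    cellVal (zammstoepsln c tri 4) i j =
      if tri.length ≤ i ∧ i < tri.length + tri.length ∧ j < tri.length then
        cellVal tri (i - tri.length) j
      else cellVal c i j := by
  have h := wouter tri.length tri.length 0 (fun y x => (tri.getD y []).getD x "") c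
    (fun y hy => hr y hy) (fun y x hy hx => by simpa using hc y x hy hx)
    tri.length le_rfl i j
  simp only [zammstoepsln]
  simpa [cellVal] using h

theorem zamm_shape (c tri : List (List String)) (pos : Nat) :
    (zammstoepsln c tri pos).length = c.length ∧
      ∀ i, ((zammstoepsln c tri pos).getD i []).length = ((c.getD i []).length) := by
  simp only [zammstoepsln]
  exact shape_foldl _ (fun g y => shape_foldl _
    (fun g' x => ⟨by split_ifs <;> simp only [length_setCell],
      fun i => by split_ifs <;> simp only [rowlen_setCell]⟩) _ g) _ c

theorem c0_len : (List.replicate 20 (List.replicate 20 "")).length = 20 := by simp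

theorem c0_row (i : Nat) (hi : i < 20) :
    (((List.replicate 20 (List.replicate 20 "")).getD i []).length) = 20 := by
  rw [List.getD_eq_getElem?_getD, List.getElem?_replicate, if_pos hi, Option.getD_some,
    List.length_replicate]

theorem grid_ext (g1 g2 : List (List String)) (h1 : g1.length = g2.length)
    (h2 : ∀ i, i < g1.length → ((g1.getD i []).length) = ((g2.getD i []).length))
    (h3 : ∀ i j, cellVal g1 i j = cellVal g2 i j) : g1 = g2 := by
  apply List.ext_getElem h1
  intro i hi1 hi2
  have e1 : g1.getD i [] = g1[i] := by
    simp [List.getD_eq_getElem?_getD, List.getElem?_eq_getElem hi1]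
  have e2 : g2.getD i [] = g2[i] := by
    simp [List.getD_eq_getElem?_getD, List.getElem?_eq_getElem hi2]
  apply List.ext_getElem
  · have := h2 i hi1; rwa [e1, e2] at this
  · intro j hj1 hj2
    have := h3 i j
    simp only [cellVal, e1, e2] at this
    rwa [List.getD_eq_getElem?_getD, List.getD_eq_getElem?_getD,
      List.getElem?_eq_getElem hj1, List.getElem?_eq_getElem hj2, Option.getD_some, Option.getD_some] at this

-- ===== VERDICT (by name: the statement is the Claim_ definition above) =====
theorem draw_diamant_spec : Claim_equal_draw_diamant := by
  intro t _hdom hpre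
  obtain ⟨hn10, hrows⟩ := hpre
  unfold Spec_draw_diamant
  have hrow : ∀ y, y < t.length → t.length ≤ ((t.getD y []).length) := by
    intro y hy
    have e : t.getD y [] = t[y] := by
      simp [List.getD_eq_getElem?_getD, List.getElem?_eq_getElem hy]
    rw [e]; exact hrows t[y] (List.getElem_mem hy)
  have hdim : pvDimension * 2 = 20 := by norm_num [pvDimension]
  -- shapes of the mirrored triangles
  have sTL := mirror_y_shape t
  have sBR := mirror_x_shape t
  have sBL := mirror_x_shape (mirror_y t)
  have hrowTL : ∀ y, y < (mirror_y t).length → (mirror_y t).length ≤ (((mirror_y t).getD y []).length) := by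
    intro y hy
    rw [sTL.1] at hy ⊢
    rw [sTL.2 y]
    exact hrow y hy
  -- A-side chain
  simp only [draw_diamant, draw_diamant_alt, hdim]
  set c0 := List.replicate 20 (List.replicate 20 "") with hc0def
  have hc0L : c0.length = 20 := by rw [hc0def]; exact c0_len
  have hc0R : ∀ i, i < 20 → ((c0.getD i []).length) = 20 := by
    intro i hi; rw [hc0def]; exact c0_row i hi
  set C1 := zammstoepsln c0 t 1 with hC1def
  set C2 := zammstoepsln C1 (mirror_y t) 2 with hC2def
  set C3 := zammstoepsln C2 (mirror_x t) 3 with hC3def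
  have s1 := zamm_shape c0 t 1
  have s2 := zamm_shape C1 (mirror_y t) 2
  have s3 := zamm_shape C2 (mirror_x t) 3
  have s4 := zamm_shape C3 (mirror_x (mirror_y t)) 4
  have l1 : C1.length = 20 := by rw [hC1def, s1.1, c0_len]
  have l2 : C2.length = 20 := by rw [hC2def, s2.1, l1]
  have l3 : C3.length = 20 := by rw [hC3def, s3.1, l2]
  have r1 : ∀ i, i < 20 → ((C1.getD i []).length) = 20 := by
    intro i hi; rw [hC1def, s1.2 i]; exact hc0R i hi
  have r2 : ∀ i, i < 20 → ((C2.getD i []).length) = 20 := by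
    intro i hi; rw [hC2def, s2.2 i]; exact r1 i hi
  have r3 : ∀ i, i < 20 → ((C3.getD i []).length) = 20 := by
    intro i hi; rw [hC3def, s3.2 i]; exact r2 i hi
  have hbl : ∀ (V1 V2 V3 V4 : Nat → Nat → String),
      ((List.range t.length).foldl (fun c y => (List.range t.length).foldl (fun c x =>
        setCell (setCell (setCell (setCell c y x (V1 y x)) y (x + t.length) (V2 y x)) (y + t.length) x (V3 y x)) (y + t.length) (x + t.length) (V4 y x)) c) c0).length = 20 ∧
      ∀ i, (((List.range t.length).foldl (fun c y => (List.range t.length).foldl (fun c x =>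
        setCell (setCell (setCell (setCell c y x (V1 y x)) y (x + t.length) (V2 y x)) (y + t.length) x (V3 y x)) (y + t.length) (x + t.length) (V4 y x)) c) c0).getD i []).length = ((c0.getD i []).length) := by
    intro V1 V2 V3 V4
    have := shape_foldl _ (fun g' y => shape_foldl (fun (c : List (List String)) x =>
        setCell (setCell (setCell (setCell c y x (V1 y x)) y (x + t.length) (V2 y x)) (y + t.length) x (V3 y x)) (y + t.length) (x + t.length) (V4 y x))
      (fun g2 a => ⟨by simp only [length_setCell], fun i => by simp only [rowlen_setCell]⟩) (List.range t.length) g') (List.range t.length) c0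
    exact ⟨by rw [this.1, c0_len], this.2⟩
  apply grid_ext
  · rw [(zamm_shape C3 (mirror_x (mirror_y t)) 4).1, l3, (hbl _ _ _ _).1]
  · intro i hi
    rw [(zamm_shape C3 (mirror_x (mirror_y t)) 4).1, l3] at hi
    rw [s4.2 i, r3 i hi, (hbl _ _ _ _).2 i, hc0R i hi]
  · intro i j
    -- A side: peel the four placement passes
    rw [zamm4_cell C3 (mirror_x (mirror_y t))
        (fun y hy => by rw [l3]; rw [sBL.1, sTL.1] at hy ⊢; omega)
        (fun y x hy hx => by
          rw [sBL.1, sTL.1] at hy hx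
          rw [r3 (y + (mirror_x (mirror_y t)).length) (by rw [sBL.1, sTL.1]; omega)]
          omega) i j]
    rw [hC3def]
    rw [zamm3_cell C2 (mirror_x t)
        (fun y hy => by rw [l2]; rw [sBR.1] at hy ⊢; omega)
        (fun y x hy hx => by
          rw [sBR.1] at hy hx
          rw [r2 (y + (mirror_x t).length) (by rw [sBR.1]; omega)]
          rw [sBR.1]; omega) i j]
    rw [hC2def]
    rw [zamm2_cell C1 (mirror_y t)
        (fun y hy => by rw [l1]; rw [sTL.1] at hy; omega)
        (fun y x hy hx => by
          rw [sTL.1] at hy hx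
          rw [r1 y (by omega)]
          omega) i j]
    rw [hC1def]
    rw [zamm1_cell c0 t
        (fun y hy => by rw [hc0L]; omega)
        (fun y x hy hx => by rw [hc0R y (by omega)]; omega) i j]
    -- rewrite the mirrored-triangle reads and normalise all mirrored lengths to t.length
    simp only [mirror_x_cell (mirror_y t) hrowTL, mirror_x_cell t hrow, mirror_y_cell t hrow,
      sBL.1, sTL.1, sBR.1]
    -- B side
    rw [bouter t.length
        (fun y x => (t.getD y []).getD (t.length - 1 - x) "")
        (fun y x => (t.getD y []).getD x "")
        (fun y x => (t.getD (t.length - 1 - y) []).getD (t.length - 1 - x) "")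
        (fun y x => (t.getD (t.length - 1 - y) []).getD x "")
        c0 hc0L hc0R hn10 t.length le_rfl i j]
    simp only [cellVal]
    split_ifs <;> first
      | rfl
      | omega
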